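-- pv_equiv track=rewrite | github.com/test4ment/OmSTU-shenanigans | Olympiad problems/Tau-Kita.py | decipher_word
-- ===== SOURCE A (Python) =====
-- def decipher_word(word):
-- 	s = ""
-- 	i, a = 0, 0
-- 	while i < len(word):
-- 		s += word[len(word)//2 + a]
-- 		if i % 2 == 0:
-- 			a += 1
-- 		i += 1
-- 		a = -a
-- 	return s
-- ===== SOURCE B (Python) =====
-- def decipher_word(word):
--     mid = len(word) // 2
--     right = word[mid:]
--     left = word[:mid][::-1]
--     out = []
--     for r, l in zip(right, left):
--         out.append(r)
--         out.append(l)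
--     if len(right) > len(left):
--         out.append(right[-1])
--     return "".join(out)
-- ===== Notes on version B (the rewrite author's own statement) =====
-- stated objective: simpler
-- what changed: Replaces the sign-alternating index arithmetic (state variable a flipped and incremented each iteration, with quadratic string +=) by splitting the string at the middle into the right half and the reversed left half and interleaving them with zip.
import Mathlib
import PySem

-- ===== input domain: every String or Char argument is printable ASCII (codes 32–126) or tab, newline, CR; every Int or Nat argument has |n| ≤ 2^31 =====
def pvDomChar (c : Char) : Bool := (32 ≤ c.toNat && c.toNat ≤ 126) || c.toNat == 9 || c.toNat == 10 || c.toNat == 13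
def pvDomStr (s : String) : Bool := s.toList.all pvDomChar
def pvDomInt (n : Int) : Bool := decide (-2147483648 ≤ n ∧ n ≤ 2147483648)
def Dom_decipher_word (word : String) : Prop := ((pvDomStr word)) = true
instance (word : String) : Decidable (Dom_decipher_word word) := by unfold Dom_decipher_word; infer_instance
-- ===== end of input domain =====

-- B reorders the string middle-out by splitting it at the middle and interleaving the
-- right half with the reversed left half, instead of A's sign-alternating index walk.

-- ===== PORT A =====
-- A's while loop: state (i, a), s += word[len(word)//2 + a]; fuel = len(word) - i.
-- The index is always in range for A, so .getD ' ' only makes the lookup total.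
def pvALoop (chars : List Char) (fuel : Nat) (i : Nat) (a : Int) (s : List Char) : List Char :=
  match fuel with
  | 0 => s
  | Nat.succ f =>
    let c := (PySem.List.pyGet? chars (PySem.Int.floordiv (chars.length : Int) 2 + a)).getD ' '
    let a' := if i % 2 = 0 then a + 1 else a
    pvALoop chars f (i + 1) (-a') (s ++ [c])

def decipher_word (word : String) : String :=
  String.mk (pvALoop word.toList word.toList.length 0 0 [])

-- ===== PORT B =====
def decipher_word_alt (word : String) : String :=
  let chars := word.toList
  let mid := PySem.Int.floordiv (chars.length : Int) 2
  let right := PySem.List.slice chars (some mid) none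
  let left := (PySem.List.slice chars none (some mid)).reverse
  let out := (right.zip left).foldl (fun acc p => acc ++ [p.1, p.2]) []
  let out := if left.length < right.length
             then out ++ [(PySem.List.pyGet? right (-1)).getD ' ']   -- right[-1]
             else out
  String.mk out

-- ===== PRECONDITION & SPEC =====
def Spec_decipher_word (word : String) (out : String) : Prop := out = decipher_word_alt word
instance (word : String) (out : String) : Decidable (Spec_decipher_word word out) := by unfold Spec_decipher_word; infer_instance

-- ===== CLAIM (what is proved, stated in full; the proofs are below) =====
def Claim_equal_decipher_word : Prop := ∀ (word : String), Dom_decipher_word word → Spec_decipher_word word (decipher_word word)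

-- ===== LEMMAS AND PROOFS =====

-- the middle-out character sequence B produces, after j interleaved pairs are emitted
def pvZig (l : List Char) (j : Nat) : List Char :=
  (((l.drop (l.length / 2)).drop j).zip (((l.take (l.length / 2)).reverse).drop j)).flatMap
    (fun p => [p.1, p.2]) ++
  (if l.length % 2 = 1 then [(l[l.length - 1]?).getD ' '] else [])

lemma pvFloordivTwo (n : Nat) :
    PySem.Int.floordiv (n : Int) 2 = ((n / 2 : Nat) : Int) := by
  exact_mod_cast PySem.Int.floordiv_natCast n 2

lemma pvZig_cons (l : List Char) (j : Nat) (hj : j < l.length / 2) :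
    pvZig l j = (l[l.length / 2 + j]?).getD ' ' :: (l[l.length / 2 - 1 - j]?).getD ' ' ::
      pvZig l (j + 1) := by
  have h1 : l.length / 2 + j < l.length := by omega
  have h2 : l.length / 2 - 1 - j < l.length := by omega
  have hllen : ((l.take (l.length / 2)).reverse).length = l.length / 2 := by
    simp; omega
  have hr : (l.drop (l.length / 2)).drop j
      = l[l.length / 2 + j] :: (l.drop (l.length / 2)).drop (j + 1) := by
    rw [List.drop_eq_getElem_cons (by simp; omega)]
    simp
  have hlidx : j < ((l.take (l.length / 2)).reverse).length := by rw [hllen]; omega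
  have hl : ((l.take (l.length / 2)).reverse).drop j
      = l[l.length / 2 - 1 - j] :: ((l.take (l.length / 2)).reverse).drop (j + 1) := by
    rw [List.drop_eq_getElem_cons hlidx]
    congr 1
    rw [List.getElem_reverse, List.getElem_take]
    congr 1
    simp at hlidx ⊢
    omega
  unfold pvZig
  rw [hr, hl, List.zip_cons_cons, List.flatMap_cons]
  simp [h1, h2]

lemma pvALoop_eq_zig (l : List Char) (j : Nat) (hj : j ≤ l.length / 2) (s : List Char) :
    pvALoop l (l.length - 2 * j) (2 * j) (j : Int) s = s ++ pvZig l j := by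
  induction hk : l.length / 2 - j generalizing j s with
  | zero =>
    have hjm : j = l.length / 2 := by omega
    subst hjm
    by_cases hpar : l.length % 2 = 1
    · have hf : l.length - 2 * (l.length / 2) = 1 := by omega
      rw [hf]
      have hz : pvZig l (l.length / 2) = [(l[l.length - 1]?).getD ' '] := by
        unfold pvZig
        rw [if_pos hpar]
        have hnil : ((l.take (l.length / 2)).reverse).drop (l.length / 2) = [] := by
          apply List.drop_eq_nil_of_le; simp
        rw [hnil]
        simp
      rw [hz]
      simp only [pvALoop]
      have hidx : (PySem.Int.floordiv (l.length : Int) 2 + ((l.length / 2 : Nat) : Int))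
          = ((l.length - 1 : Nat) : Int) := by
        rw [pvFloordivTwo]
        omega
      rw [hidx]
      simp
    · have hf : l.length - 2 * (l.length / 2) = 0 := by omega
      rw [hf]
      have hz : pvZig l (l.length / 2) = [] := by
        unfold pvZig
        rw [if_neg hpar]
        have hnil : (l.drop (l.length / 2)).drop (l.length / 2) = [] := by
          apply List.drop_eq_nil_of_le; simp; omega
        rw [hnil]
        simp
      rw [hz]
      simp [pvALoop]
  | succ k ih =>
    have hjlt : j < l.length / 2 := by omega
    have hf : l.length - 2 * j = (l.length - 2 * (j + 1)) + 1 + 1 := by omega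
    rw [hf]
    simp only [pvALoop]
    have hc1 : (2 * j) % 2 = 0 := by omega
    have hc2 : ¬ ((2 * j + 1) % 2 = 0) := by omega
    rw [if_pos hc1]
    rw [if_neg hc2]
    have hneg : -(-((j : Int) + 1)) = ((j + 1 : Nat) : Int) := by push_cast; ring
    have hi2 : 2 * j + 1 + 1 = 2 * (j + 1) := by omega
    rw [hneg, hi2]
    rw [ih (j + 1) (by omega) _ (by omega)]
    have hidx1 : (PySem.Int.floordiv (l.length : Int) 2 + (j : Int))
        = ((l.length / 2 + j : Nat) : Int) := by
      rw [pvFloordivTwo]; push_cast; ring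
    have hidx2 : (PySem.Int.floordiv (l.length : Int) 2 + -((j : Int) + 1))
        = ((l.length / 2 - 1 - j : Nat) : Int) := by
      rw [pvFloordivTwo]; omega
    rw [hidx1, hidx2, PySem.List.pyGet?_natCast, PySem.List.pyGet?_natCast]
    rw [pvZig_cons l j hjlt]
    simp

theorem decipher_word_spec : Claim_equal_decipher_word := by
  intro word _
  unfold Spec_decipher_word decipher_word decipher_word_alt
  have h0 := pvALoop_eq_zig word.toList 0 (by omega) []
  simp only [Nat.mul_zero, Nat.sub_zero, Nat.cast_zero, List.nil_append] at h0
  rw [h0]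
  simp only [pvFloordivTwo, PySem.List.slice_from_natCast, PySem.List.slice_to_natCast,
    PySem.List.foldl_append_eq_flatMap, List.nil_append]
  congr 1
  unfold pvZig
  simp only [List.drop_zero]
  by_cases hpar : word.toList.length % 2 = 1
  · have hlt : ((word.toList.take (word.toList.length / 2)).reverse).length
        < (word.toList.drop (word.toList.length / 2)).length := by
      simp only [List.length_reverse, List.length_take, List.length_drop]; omega
    rw [if_pos hlt, if_pos hpar]
    have hix : word.toList.length / 2 + ((word.toList.drop (word.toList.length / 2)).length - 1)
        = word.toList.length - 1 := by
      rw [List.length_drop]; omega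
    rw [PySem.List.pyGet?_neg_one, List.getLast?_eq_getElem?, List.getElem?_drop, hix]
  · have hlt : ¬ (((word.toList.take (word.toList.length / 2)).reverse).length
        < (word.toList.drop (word.toList.length / 2)).length) := by
      simp only [List.length_reverse, List.length_take, List.length_drop]; omega
    rw [if_neg hlt, if_neg hpar]
    simp
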